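-- pv_equiv track=rewrite | github.com/mhasan-t/ftp_crawler_imdbpy | etc_files/take_names.py | take_name
-- ===== SOURCE A (Python) =====
-- def take_name(s):
--     y = []
--     le = len(s)
--     z = 0
--     x = 0
--     for i in range(-1, -le - 1, -1):
--         if s[i] == '/':
--             z = i
--             break
--
--     for i in range(z - 1, -le - 1, -1):
--         if s[i] == '/':
--             x = i
--             break
--
--     for i in range(z - 1, x, -1):
--         y.append(s[i])
--
--     yo = "".join(y)
--
--     yo = yo[::-1]
--     return yo
-- ===== SOURCE B (Python) =====
-- def take_name(s):
--     parts = s.split('/')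
--     return parts[-2] if len(parts) >= 3 else ""
-- ===== Notes on version B (the rewrite author's own statement) =====
-- stated objective: idiomatic
-- what changed: A locates the last two slashes with two explicit backward index scans and rebuilds the middle characters one by one before reversing; B splits the string on the slash character once and returns the second-to-last piece when the split yields at least three pieces, else the empty string.
import Mathlib
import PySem

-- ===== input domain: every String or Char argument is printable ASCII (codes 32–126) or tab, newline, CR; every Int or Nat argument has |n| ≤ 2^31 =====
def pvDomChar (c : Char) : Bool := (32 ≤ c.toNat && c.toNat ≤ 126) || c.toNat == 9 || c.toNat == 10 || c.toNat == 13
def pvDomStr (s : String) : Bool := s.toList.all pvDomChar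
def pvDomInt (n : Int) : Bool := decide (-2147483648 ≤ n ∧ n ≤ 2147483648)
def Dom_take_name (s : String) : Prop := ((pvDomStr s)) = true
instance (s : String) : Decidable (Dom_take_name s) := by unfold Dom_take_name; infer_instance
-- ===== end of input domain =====

-- B replaces A's two backward slash-scans plus manual reverse by one split('/') and a single index (objective: idiomatic).

-- ===== PORT A =====
-- 'for i in range(a, b, -1): if s[i] == "/": <var> = i; break' — scan the index list, return on first hit, else the default.
def firstSlashLoop (cs : List Char) (idxs : List Int) (dflt : Int) : Int :=
  match idxs with
  | [] => dflt
  | i :: rest => if PySem.List.pyGet? cs i = some '/' then i else firstSlashLoop cs rest dflt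

def take_name (s : String) : String :=
  let cs := s.toList
  let le : Int := PySem.Str.len s
  let z := firstSlashLoop cs (PySem.List.pyRange (-1) (-le - 1) (-1)) 0
  let x := firstSlashLoop cs (PySem.List.pyRange (z - 1) (-le - 1) (-1)) 0
  -- y.append(s[i]); every i this loop visits is a valid index, so the .getD ' ' default is never taken
  let y := (PySem.List.pyRange (z - 1) x (-1)).foldl
      (fun acc i => acc ++ [(PySem.List.pyGet? cs i).getD ' ']) ([] : List Char)
  let yo := String.ofList y          -- "".join(y)
  (PySem.Str.slice? yo none none (-1)).getD ""   -- yo[::-1]; step -1 ≠ 0, so never none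

-- ===== PORT B =====
def take_name_alt (s : String) : String :=
  let parts := (PySem.Str.split? s "/").getD []   -- s.split('/'); sep ≠ "", so never none
  if 3 ≤ parts.length then (PySem.List.pyGet? parts (-2)).getD "" else ""

-- ===== PRECONDITION & SPEC =====
def Spec_take_name (s : String) (out : String) : Prop := out = take_name_alt s
instance (s : String) (out : String) : Decidable (Spec_take_name s out) := by unfold Spec_take_name; infer_instance

-- ===== CLAIM (what is proved, stated in full; the proofs are below) =====
def Claim_equal_take_name : Prop := ∀ (s : String), Dom_take_name s → Spec_take_name s (take_name s)

-- ===== LEMMAS AND PROOFS =====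

def prependPiece (p : List Char) : List (List Char) → List (List Char)
  | [] => [p]
  | h :: t => (p ++ h) :: t

def splitL : List Char → List (List Char)
  | [] => [[]]
  | c :: t => if c = '/' then [] :: splitL t else prependPiece [c] (splitL t)

lemma prependPiece_ne_nil (p : List Char) (l : List (List Char)) : prependPiece p l ≠ [] := by
  cases l <;> simp [prependPiece]

lemma splitL_ne_nil (u : List Char) : splitL u ≠ [] := by
  cases u with
  | nil => simp [splitL]
  | cons c t =>
    by_cases hc : c = '/' <;> simp [splitL, hc, prependPiece_ne_nil]

lemma prependPiece_nil (l : List (List Char)) (h : l ≠ []) : prependPiece [] l = l := by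
  cases l with
  | nil => exact absurd rfl h
  | cons a t => simp [prependPiece]

lemma splitL_no_slash (u : List Char) (h : '/' ∉ u) : splitL u = [u] := by
  induction u with
  | nil => rfl
  | cons c t ih =>
    simp only [List.mem_cons, not_or] at h
    simp [splitL, Ne.symm h.1, ih h.2, prependPiece]

lemma splitL_prefix_no_slash (m r : List Char) (hm : '/' ∉ m) :
    splitL (m ++ '/' :: r) = m :: splitL r := by
  induction m with
  | nil => simp [splitL]
  | cons c m' ih =>
    simp only [List.mem_cons, not_or] at hm
    simp [splitL, Ne.symm hm.1, ih hm.2, prependPiece]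

lemma splitL_two (u m v : List Char) (hm : '/' ∉ m) (hv : '/' ∉ v) :
    ∃ D : List (List Char), D ≠ [] ∧ splitL (u ++ '/' :: m ++ '/' :: v) = D ++ [m, v] := by
  induction u with
  | nil =>
    refine ⟨[[]], by simp, ?_⟩
    simp [splitL, splitL_prefix_no_slash m v hm, splitL_no_slash v hv]
  | cons c u' ih =>
    obtain ⟨D, hD, hEq⟩ := ih
    by_cases hc : c = '/'
    · refine ⟨[] :: D, by simp, ?_⟩
      have hEq' : splitL (u' ++ '/' :: (m ++ '/' :: v)) = D ++ [m, v] := by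
        simpa [List.append_assoc] using hEq
      simp [splitL, hc, hEq']
    · cases D with
      | nil => exact absurd rfl hD
      | cons h t =>
        refine ⟨(c :: h) :: t, by simp, ?_⟩
        have hEq' : splitL (u' ++ '/' :: (m ++ '/' :: v)) = h :: (t ++ [m, v]) := by
          simpa [List.append_assoc] using hEq
        simp [splitL, hc, hEq', prependPiece]

lemma first_slash_decomp (l : List Char) : '/' ∉ l ∨ ∃ a t, l = a ++ '/' :: t ∧ '/' ∉ a := by
  induction l with
  | nil => left; simp
  | cons x xs ih =>
    by_cases hx : x = '/'
    · right; exact ⟨[], xs, by simp [hx], by simp⟩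
    · rcases ih with h | ⟨a, t, hEq, ha⟩
      · left; simp [Ne.symm hx, h]
      · right; exact ⟨x :: a, t, by simp [hEq], by simp [Ne.symm hx, ha]⟩

lemma go_spec (fuel : Nat) :
    ∀ (l cur : List Char) (acc : List (List Char)), l.length ≤ fuel →
    PySem.Chars.splitOn.go ['/'] fuel l cur acc = acc.reverse ++ prependPiece cur.reverse (splitL l) := by
  induction fuel with
  | zero =>
    intro l cur acc h
    have : l = [] := List.eq_nil_of_length_eq_zero (Nat.le_zero.mp h)
    subst this
    simp [PySem.Chars.splitOn.go, splitL, prependPiece]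
  | succ fuel ih =>
    intro l cur acc h
    cases l with
    | nil => simp [PySem.Chars.splitOn.go, splitL, prependPiece]
    | cons c rest =>
      rw [PySem.Chars.splitOn.go]
      by_cases hc : c = '/'
      · simp only [hc, List.isPrefixOf, BEq.rfl, Bool.true_and, if_true]
        rw [show List.drop (['/'].length) ('/' :: rest) = rest from rfl,
          ih rest [] (cur.reverse :: acc) (by simpa using Nat.le_of_succ_le_succ h)]
        obtain ⟨h0, t0, hEq⟩ : ∃ h0 t0, splitL rest = h0 :: t0 := by
          cases hrest : splitL rest with
          | nil => exact absurd hrest (splitL_ne_nil rest)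
          | cons a b => exact ⟨a, b, rfl⟩
        simp [splitL, hEq, prependPiece]
      · have hpre : (['/'].isPrefixOf (c :: rest)) = false := by
          simp [List.isPrefixOf]; exact fun h => absurd h.symm hc
        simp only [hpre]
        rw [ih rest (c :: cur) acc (by simpa using Nat.le_of_succ_le_succ h)]
        obtain ⟨h0, t0, hEq⟩ : ∃ h0 t0, splitL rest = h0 :: t0 := by
          cases hrest : splitL rest with
          | nil => exact absurd hrest (splitL_ne_nil rest)
          | cons a b => exact ⟨a, b, rfl⟩
        simp [splitL, hc, hEq, prependPiece]

lemma splitOn_eq (cs : List Char) : PySem.Chars.splitOn cs ['/'] = splitL cs := by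
  rw [PySem.Chars.splitOn, go_spec _ _ _ _ (by omega)]
  simp [prependPiece_nil _ (splitL_ne_nil cs)]

lemma pyGet_rev (cs w t : List Char) (c : Char) (h : cs.reverse = w ++ c :: t) :
    PySem.List.pyGet? cs (-(w.length : Int) - 1) = some c := by
  have hcs : cs = t.reverse ++ c :: w.reverse := by
    have := congrArg List.reverse h
    simpa using this
  have hlen : cs.length = t.length + 1 + w.length := by
    rw [hcs]; simp; omega
  have hidx : (-(w.length : Int) - 1) = -((w.length + 1 : Nat) : Int) := by push_cast; ring
  rw [hidx, PySem.List.pyGet?_neg_natCast cs (w.length + 1) (by omega) (by omega)]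
  rw [show cs.length - (w.length + 1) = t.length by omega]
  rw [hcs, List.getElem?_append_right (by simp)]
  simp

lemma scan_skip (cs : List Char) (d : Int) :
    ∀ (a w rest : List Char), '/' ∉ a → cs.reverse = w ++ a ++ rest →
    firstSlashLoop cs (PySem.List.pyRange (-(w.length : Int) - 1) (-(cs.length : Int) - 1) (-1)) d
      = firstSlashLoop cs
          (PySem.List.pyRange (-(w.length : Int) - (a.length : Int) - 1) (-(cs.length : Int) - 1) (-1)) d := by
  intro a
  induction a with
  | nil => intro w rest _ _; simp
  | cons x a' ih =>
    intro w rest hns h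
    simp only [List.mem_cons, not_or] at hns
    have hlen : cs.length = w.length + (a'.length + 1) + rest.length := by
      have := congrArg List.length h
      simp at this; omega
    rw [PySem.List.pyRange_neg_one_cons (by omega)]
    have hget : PySem.List.pyGet? cs (-(w.length : Int) - 1) = some x :=
      pyGet_rev cs w (a' ++ rest) x (by simpa using h)
    rw [show firstSlashLoop cs ((-(w.length : Int) - 1) ::
          PySem.List.pyRange (-(w.length : Int) - 1 - 1) (-(cs.length : Int) - 1) (-1)) d
        = if PySem.List.pyGet? cs (-(w.length : Int) - 1) = some '/'
          then (-(w.length : Int) - 1)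
          else firstSlashLoop cs
            (PySem.List.pyRange (-(w.length : Int) - 1 - 1) (-(cs.length : Int) - 1) (-1)) d from rfl]
    rw [hget, if_neg (by simp only [Option.some.injEq]; exact fun hh => hns.1 hh.symm)]
    rw [show (-(w.length : Int) - 1 - 1) = -(((w ++ [x]).length : Nat) : Int) - 1 by
      simp only [List.length_append, List.length_cons, List.length_nil]; push_cast; ring]
    rw [ih (w ++ [x]) rest hns.2 (by simpa using h)]
    rw [show (-(((w ++ [x]).length : Nat) : Int) - (a'.length : Int) - 1)
        = -(w.length : Int) - ((x :: a').length : Int) - 1 by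
      simp only [List.length_append, List.length_cons, List.length_nil]; push_cast; ring]

lemma scan_none (cs w t : List Char) (d : Int) (hns : '/' ∉ t) (h : cs.reverse = w ++ t) :
    firstSlashLoop cs (PySem.List.pyRange (-(w.length : Int) - 1) (-(cs.length : Int) - 1) (-1)) d = d := by
  rw [scan_skip cs d t w [] hns (by simpa using h)]
  have hlen : cs.length = w.length + t.length := by
    have := congrArg List.length h
    simp at this; omega
  rw [PySem.List.pyRange_neg_one_eq_nil (by omega)]
  rfl

lemma scan_found (cs w a t : List Char) (d : Int) (hns : '/' ∉ a) (h : cs.reverse = w ++ a ++ '/' :: t) :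
    firstSlashLoop cs (PySem.List.pyRange (-(w.length : Int) - 1) (-(cs.length : Int) - 1) (-1)) d
      = -(w.length : Int) - (a.length : Int) - 1 := by
  rw [scan_skip cs d a w ('/' :: t) hns h]
  have hlen : cs.length = w.length + a.length + 1 + t.length := by
    have := congrArg List.length h
    simp at this; omega
  rw [PySem.List.pyRange_neg_one_cons (by omega)]
  have hget : PySem.List.pyGet? cs (-((w ++ a).length : Int) - 1) = some '/' :=
    pyGet_rev cs (w ++ a) t '/' (by simpa [List.append_assoc] using h)
  have he : (-(w.length : Int) - (a.length : Int) - 1) = -((w ++ a).length : Int) - 1 := by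
    simp only [List.length_append]; push_cast; ring
  rw [show firstSlashLoop cs ((-(w.length : Int) - (a.length : Int) - 1) ::
        PySem.List.pyRange (-(w.length : Int) - (a.length : Int) - 1 - 1) (-(cs.length : Int) - 1) (-1)) d
      = if PySem.List.pyGet? cs (-(w.length : Int) - (a.length : Int) - 1) = some '/'
        then (-(w.length : Int) - (a.length : Int) - 1)
        else firstSlashLoop cs
          (PySem.List.pyRange (-(w.length : Int) - (a.length : Int) - 1 - 1) (-(cs.length : Int) - 1) (-1)) d
      from rfl]
  rw [he, hget, if_pos rfl]

lemma loop3 (cs : List Char) :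
    ∀ (b pref suff acc0 : List Char), cs.reverse = pref ++ b ++ suff →
    (PySem.List.pyRange (-(pref.length : Int) - 1) (-(pref.length : Int) - 1 - (b.length : Int)) (-1)).foldl
      (fun acc i => acc ++ [(PySem.List.pyGet? cs i).getD ' ']) acc0 = acc0 ++ b := by
  intro b
  induction b with
  | nil =>
    intro pref suff acc0 _
    rw [PySem.List.pyRange_neg_one_eq_nil (by simp)]
    simp
  | cons x b' ih =>
    intro pref suff acc0 h
    rw [PySem.List.pyRange_neg_one_cons (by
      have : (0 : Int) < ((x :: b').length : Int) := by
        simp only [List.length_cons]; push_cast; omega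
      omega)]
    simp only [List.foldl_cons]
    have hget : PySem.List.pyGet? cs (-(pref.length : Int) - 1) = some x :=
      pyGet_rev cs pref (b' ++ suff) x (by simpa using h)
    rw [hget]
    have e1 : (-(pref.length : Int) - 1 - 1) = -(((pref ++ [x]).length : Nat) : Int) - 1 := by
      simp only [List.length_append, List.length_cons, List.length_nil]; push_cast; ring
    have e2 : (-(pref.length : Int) - 1 - ((x :: b').length : Int))
        = -(((pref ++ [x]).length : Nat) : Int) - 1 - (b'.length : Int) := by
      simp only [List.length_append, List.length_cons, List.length_nil]; push_cast; ring
    rw [show ((some x).getD ' ') = x from rfl, e1, e2,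
      ih (pref ++ [x]) suff (acc0 ++ [x]) (by simpa using h)]
    simp

lemma split_parts (s : String) :
    (PySem.Str.split? s "/").getD [] = (splitL s.toList).map String.ofList := by
  simp [PySem.Str.split?, PySem.Chars.split?, splitOn_eq]

lemma take_name_eq (s : String) : take_name s = take_name_alt s := by
  unfold take_name take_name_alt
  simp only [PySem.Str.len_eq, split_parts, PySem.Str.slice?_none_none_neg_one,
    Option.getD_some, String.toList_ofList]
  generalize s.toList = cs
  rcases first_slash_decomp cs.reverse with hno | ⟨a, rest, hdec, hna⟩
  · -- no slash at all
    have hz := scan_none cs [] cs.reverse 0 hno (by simp)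
    simp only [List.length_nil, Nat.cast_zero, neg_zero, zero_sub] at hz
    rw [hz]
    have hx := scan_none cs [] cs.reverse 0 hno (by simp)
    simp only [List.length_nil, Nat.cast_zero, neg_zero, zero_sub] at hx
    rw [show (0 : Int) - 1 = -1 by ring, hx]
    rw [PySem.List.pyRange_neg_one_eq_nil (by omega)]
    have hs : splitL cs = [cs] := splitL_no_slash cs (by simpa using hno)
    simp [hs]
  · rcases first_slash_decomp rest with hno2 | ⟨b, c, hdec2, hnb⟩
    · -- exactly one slash
      have hz := scan_found cs [] a rest 0 hna (by simpa using hdec)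
      simp only [List.length_nil, Nat.cast_zero, neg_zero, zero_sub] at hz
      rw [hz]
      have hx := scan_none cs (a ++ ['/']) rest 0 hno2 (by
        rw [hdec]; simp)
      have e1 : (-(a.length : Int) - 1 - 1) = -(((a ++ ['/']).length : Nat) : Int) - 1 := by
        simp only [List.length_append, List.length_cons, List.length_nil]; push_cast; ring
      rw [e1, hx]
      rw [PySem.List.pyRange_neg_one_eq_nil (by omega)]
      have hcs : cs = rest.reverse ++ '/' :: a.reverse := by
        have := congrArg List.reverse hdec
        simpa using this
      have hs : splitL cs = [rest.reverse, a.reverse] := by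
        rw [hcs, splitL_prefix_no_slash _ _ (by simpa using hno2),
          splitL_no_slash _ (by simpa using hna)]
      simp [hs]
    · -- at least two slashes
      have hz := scan_found cs [] a rest 0 hna (by simpa using hdec)
      simp only [List.length_nil, Nat.cast_zero, neg_zero, zero_sub] at hz
      rw [hz]
      have hx := scan_found cs (a ++ ['/']) b c 0 hnb (by
        rw [hdec, hdec2]; simp)
      have e1 : (-(a.length : Int) - 1 - 1) = -(((a ++ ['/']).length : Nat) : Int) - 1 := by
        simp only [List.length_append, List.length_cons, List.length_nil]; push_cast; ring
      rw [e1, hx]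
      have hy := loop3 cs b (a ++ ['/']) ('/' :: c) []
        (by rw [hdec, hdec2]; simp)
      have e2 : (-(((a ++ ['/']).length : Nat) : Int) - (b.length : Int) - 1)
          = -(((a ++ ['/']).length : Nat) : Int) - 1 - (b.length : Int) := by ring
      rw [e2, hy]
      have hcs : cs = c.reverse ++ '/' :: b.reverse ++ '/' :: a.reverse := by
        have := congrArg List.reverse (hdec.trans (by rw [hdec2]))
        simpa [List.append_assoc] using this
      obtain ⟨D, hD, hs⟩ := splitL_two c.reverse b.reverse a.reverse
        (by simpa using hnb) (by simpa using hna)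
      have hsL : splitL cs = D ++ [b.reverse, a.reverse] := by
        rw [hcs]; simpa [List.append_assoc] using hs
      have hlen3 : 3 ≤ ((splitL cs).map String.ofList).length := by
        rw [hsL]; cases D with
        | nil => exact absurd rfl hD
        | cons d0 D' => simp
      rw [if_pos hlen3]
      have hget2 : PySem.List.pyGet? ((splitL cs).map String.ofList) (-2)
          = some (String.ofList b.reverse) := by
        rw [PySem.List.pyGet?_neg_ofNat _ 2 (by omega) (by omega)]
        rw [hsL]
        rw [show List.map String.ofList (D ++ [b.reverse, a.reverse])
            = List.map String.ofList D ++ [String.ofList b.reverse, String.ofList a.reverse] by simp]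
        rw [show (List.map String.ofList D ++
            [String.ofList b.reverse, String.ofList a.reverse]).length - 2 = D.length by simp]
        rw [List.getElem?_append_right (by simp)]
        simp
      rw [hget2]
      simp

-- ===== VERDICT (by name: the statement is the Claim_ definition above) =====
theorem take_name_spec : Claim_equal_take_name :=
  fun s _ => take_name_eq s
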